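-- pv_equiv track=rewrite | github.com/secnot/uva-onlinejudge-solutions | 10132 - File Fragmentation/main.py | can_place_left
-- ===== SOURCE A (Python) =====
-- BOTH = 'B'
--
-- def can_place_left(fragment, pattern):
--     matches = 0
--     for f, p in zip(fragment, pattern):
--         if p==BOTH:
--             continue
--         elif p==f:
--             matches += 1
--         else:
--             return -1
--     return len(fragment)-matches
-- ===== SOURCE B (Python) =====
-- BOTH = 'B'
--
-- def can_place_left(fragment, pattern):
--     # Wildcard-masking: copy the fragment prefix, stamp BOTH into it at every
--     # wildcard position of the pattern (visiting only those positions via find),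
--     # then decide success by one whole-string comparison against the pattern.
--     n = min(len(fragment), len(pattern))
--     fp = fragment[:n]
--     pp = pattern[:n]
--     masked = list(fp)
--     i = pp.find(BOTH)
--     while i != -1:
--         masked[i] = BOTH
--         i = pp.find(BOTH, i + 1)
--     if ''.join(masked) != pp:
--         return -1
--     return len(fragment) - n + masked.count(BOTH)
-- ===== Notes on version B (the rewrite author's own statement) =====
-- stated objective: faster
-- what changed: Replaced the accumulating per-position scan by wildcard masking: B copies the fragment prefix, stamps 'B' into it only at wildcard positions located with str.find, then decides success by one whole-string comparison and derives the result from a count; the per-character work moves from the Python loop to C-level find/compare/count.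
import Mathlib
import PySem

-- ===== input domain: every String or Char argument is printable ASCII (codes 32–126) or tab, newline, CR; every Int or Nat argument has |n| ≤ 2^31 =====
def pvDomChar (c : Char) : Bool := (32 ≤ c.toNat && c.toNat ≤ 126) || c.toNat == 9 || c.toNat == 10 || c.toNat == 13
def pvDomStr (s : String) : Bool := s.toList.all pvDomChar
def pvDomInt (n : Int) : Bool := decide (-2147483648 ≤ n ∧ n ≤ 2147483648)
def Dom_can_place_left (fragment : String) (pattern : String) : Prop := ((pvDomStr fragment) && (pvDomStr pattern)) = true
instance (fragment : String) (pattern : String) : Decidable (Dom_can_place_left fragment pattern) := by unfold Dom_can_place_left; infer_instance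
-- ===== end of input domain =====

-- B replaces A's accumulating per-position scan by wildcard masking: stamp 'B' into a copy of the
-- fragment prefix at the wildcard positions found with str.find, then one whole-string comparison.

-- ===== PORT A =====
-- the for-loop over zip(fragment, pattern) with accumulator `acc` (= matches); early return -1 on conflict
def pvALoop (flen : Int) : List (Char × Char) → Int → Int
  | [], acc => flen - acc
  | (f, p) :: rest, acc =>
    if p = 'B' then pvALoop flen rest acc
    else if p = f then pvALoop flen rest (acc + 1)
    else -1

def can_place_left (fragment : String) (pattern : String) : Int :=
  pvALoop (fragment.toList.length : Int) (fragment.toList.zip pattern.toList) 0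

-- ===== PORT B =====
-- the while loop `while i != -1: masked[i] = BOTH; i = pp.find(BOTH, i+1)`; fuel only makes it total
-- (each step strictly increases i below pp.length, so pp.length + 1 steps always suffice)
def pvMaskLoop (pp : List Char) : Nat → List Char → Int → List Char
  | 0, masked, _ => masked
  | fuel + 1, masked, i =>
    if i = -1 then masked
    else pvMaskLoop pp fuel (masked.set i.toNat 'B') (PySem.Chars.findFrom pp ['B'] (i + 1))

def can_place_left_alt (fragment : String) (pattern : String) : Int :=
  let fl := fragment.toList
  let pl := pattern.toList
  let n := min fl.length pl.length
  let fp := PySem.List.slice fl none (some (n : Int))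
  let pp := PySem.List.slice pl none (some (n : Int))
  let masked := pvMaskLoop pp (pp.length + 1) fp (PySem.Chars.find pp ['B'])
  if masked ≠ pp then -1
  else (fl.length : Int) - (n : Int) + (masked.count 'B' : Int)

-- ===== PRECONDITION & SPEC =====
def Spec_can_place_left (fragment : String) (pattern : String) (out : Int) : Prop := out = can_place_left_alt fragment pattern
instance (fragment : String) (pattern : String) (out : Int) : Decidable (Spec_can_place_left fragment pattern out) := by unfold Spec_can_place_left; infer_instance

-- ===== CLAIM (what is proved, stated in full; the proofs are below) =====
def Claim_equal_can_place_left : Prop := ∀ (fragment : String) (pattern : String), Dom_can_place_left fragment pattern → Spec_can_place_left fragment pattern (can_place_left fragment pattern)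

-- ===== LEMMAS AND PROOFS =====
-- the masking function both sides are reduced to
def pvMask (m p : Char) : Char := if p = 'B' then 'B' else m

-- the intended result of the masking loop from position k on
def pvMaskFrom (masked pp : List Char) (k : Nat) : List Char :=
  masked.take k ++ List.zipWith pvMask (masked.drop k) (pp.drop k)

lemma pvSingPrefixDrop (pp : List Char) (j : Nat) :
    ['B'] <+: pp.drop j ↔ pp[j]? = some 'B' := by
  have h0 : pp[j]? = (pp.drop j)[0]? := by simp
  rw [h0]
  cases h : pp.drop j with
  | nil => simp
  | cons c t => simp [List.cons_prefix_cons, eq_comm]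

lemma pvZipMask_self : ∀ (md pd : List Char), md.length = pd.length → (∀ p ∈ pd, p ≠ 'B') →
    List.zipWith pvMask md pd = md := by
  intro md
  induction md with
  | nil => intro pd _ _; simp
  | cons m md ih =>
    intro pd hlen hB
    cases pd with
    | nil => simp at hlen
    | cons p pd =>
      have hp : p ≠ 'B' := hB p (by simp)
      simp only [List.zipWith_cons_cons, pvMask, if_neg hp]
      rw [ih pd (by simpa using hlen) (fun q hq => hB q (by simp [hq]))]

lemma pvMaskFrom_length (masked pp : List Char) (k : Nat) (h : masked.length = pp.length) :
    (pvMaskFrom masked pp k).length = masked.length := by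
  simp [pvMaskFrom, h]
  omega

lemma pvMaskFrom_getElem (masked pp : List Char) (k : Nat) (h : masked.length = pp.length)
    (j : Nat) (hj : j < masked.length) (hjp : j < pp.length) :
    (pvMaskFrom masked pp k)[j]'(by rw [pvMaskFrom_length masked pp k h]; exact hj) =
      if k ≤ j ∧ pp[j] = 'B' then 'B' else masked[j] := by
  unfold pvMaskFrom
  by_cases hk : j < k
  · rw [List.getElem_append_left (by simp; omega)]
    simp [List.getElem_take]
    omega
  · rw [Nat.not_lt] at hk
    have hlt : j - k < (List.zipWith pvMask (masked.drop k) (pp.drop k)).length := by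
      simp [h]; omega
    rw [List.getElem_append_right (by simp; omega)]
    have : (masked.take k).length = k := by simp; omega
    simp only [this, List.getElem_zipWith, List.getElem_drop]
    have hjk : k + (j - k) = j := by omega
    simp only [hjk, pvMask]
    simp [hk]

lemma pvMaskFrom_step (masked pp : List Char) (k j0 : Nat) (h : masked.length = pp.length)
    (hk : k ≤ j0) (hj0 : j0 < pp.length) (hB : pp[j0] = 'B')
    (hmin : ∀ m, k ≤ m → m < j0 → (hm : m < pp.length) → pp[m] ≠ 'B') :
    pvMaskFrom (masked.set j0 'B') pp (j0 + 1) = pvMaskFrom masked pp k := by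
  have hset : (masked.set j0 'B').length = masked.length := by simp
  apply List.ext_getElem
  · rw [pvMaskFrom_length _ _ _ (by rw [hset]; exact h),
      pvMaskFrom_length _ _ _ h, hset]
  · intro j hj1 hj2
    have hjm : j < masked.length := by
      rw [pvMaskFrom_length _ _ _ h] at hj2; exact hj2
    have hjp : j < pp.length := by omega
    rw [pvMaskFrom_getElem _ _ _ (by rw [hset]; exact h) j (by rw [hset]; exact hjm) hjp,
      pvMaskFrom_getElem _ _ _ h j hjm hjp]
    rcases lt_trichotomy j j0 with hlt | heq | hgt
    · have h1 : ¬ (j0 + 1 ≤ j) := by omega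
      simp only [h1, false_and, if_false]
      rw [List.getElem_set_ne (by omega)]
      by_cases h2 : k ≤ j
      · have := hmin j h2 hlt hjp
        simp [this]
      · simp [h2]
    · subst heq
      have h1 : ¬ (j + 1 ≤ j) := by omega
      simp only [h1, false_and, if_false]
      rw [List.getElem_set_self (by omega)]
      simp [hk, hB]
    · have h1 : j0 + 1 ≤ j := by omega
      have h2 : k ≤ j := by omega
      simp only [h1, h2, true_and]
      by_cases h3 : pp[j] = 'B'
      · simp [h3]
      · simp [h3]
        rw [List.getElem_set_ne (by omega)]

lemma pvMaskLoop_spec (pp : List Char) : ∀ (fuel : Nat) (k : Nat) (masked : List Char),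
    k ≤ pp.length → pp.length - k < fuel → masked.length = pp.length →
    pvMaskLoop pp fuel masked (PySem.Chars.findFrom pp ['B'] (k : Int)) = pvMaskFrom masked pp k := by
  intro fuel
  induction fuel with
  | zero => intro k masked hk hfuel hlen; omega
  | succ fuel ih =>
    intro k masked hk hfuel hlen
    by_cases hi : PySem.Chars.findFrom pp ['B'] (k : Int) = -1
    · rw [pvMaskLoop, if_pos hi]
      have hnoB : ¬ (['B'] <:+: pp.drop k) :=
        (PySem.Chars.findFrom_natCast_eq_neg_one_iff pp ['B'] k hk).mp hi
      have hallB : ∀ p ∈ pp.drop k, p ≠ 'B' := by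
        intro p hp hpB
        subst hpB
        obtain ⟨s, t, hst⟩ := List.append_of_mem hp
        exact hnoB ⟨s, t, by rw [hst]; simp⟩
      unfold pvMaskFrom
      rw [pvZipMask_self _ _ (by simp [hlen]) hallB, List.take_append_drop]
    · rw [pvMaskLoop, if_neg hi]
      obtain ⟨hge, hpre, hminp⟩ := PySem.Chars.findFrom_natCast_spec pp ['B'] k hk hi
      set i := PySem.Chars.findFrom pp ['B'] (k : Int) with hidef
      have hinn : 0 ≤ i := le_trans (by exact_mod_cast Nat.zero_le k) hge
      have hgetB : pp[i.toNat]? = some 'B' := (pvSingPrefixDrop pp i.toNat).mp hpre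
      obtain ⟨hilt, higet⟩ := List.getElem?_eq_some_iff.mp hgetB
      have hik : k ≤ i.toNat := by omega
      have hcast : i + 1 = ((i.toNat + 1 : Nat) : Int) := by omega
      rw [hcast, ih (i.toNat + 1) (masked.set i.toNat 'B') (by omega) (by omega) (by simp [hlen])]
      exact pvMaskFrom_step masked pp k i.toNat hlen hik hilt higet
        (fun m hm1 hm2 hm3 hmB => by
          have : ['B'] <+: pp.drop m := (pvSingPrefixDrop pp m).mpr (by
            rw [List.getElem?_eq_getElem hm3, hmB])
          exact hminp m hm1 hm2 this)

-- A's loop in closed form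
lemma pvALoop_eq (flen : Int) : ∀ (zs : List (Char × Char)) (m : Int),
    pvALoop flen zs m =
      if zs.any (fun fp => fp.2 ≠ 'B' && fp.2 ≠ fp.1) then -1
      else flen - m - (zs.length : Int) + ((zs.map Prod.snd).count 'B' : Int) := by
  intro zs
  induction zs with
  | nil => intro m; simp [pvALoop]
  | cons hd tl ih =>
    intro m
    obtain ⟨f, p⟩ := hd
    by_cases hB : p = 'B'
    · subst hB
      simp [pvALoop, ih]
      split
      · rfl
      · ring
    · by_cases hf : p = f
      · subst hf
        simp [pvALoop, ih, hB]
        split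
        · rfl
        · simp; ring
      · simp [pvALoop, hB, hf]

lemma pvMapSndZipTake (fs : List Char) : ∀ (ps : List Char),
    (fs.zip ps).map Prod.snd = ps.take fs.length := by
  induction fs with
  | nil => intro ps; simp
  | cons f fs ih =>
    intro ps
    cases ps with
    | nil => simp
    | cons p ps => simp [ih]

lemma pvMaskHead (f p : Char) : pvMask f p = p ↔ (p = 'B' ∨ p = f) := by
  unfold pvMask
  by_cases hB : p = 'B' <;> simp [hB, eq_comm]

lemma pvMaskEqIff : ∀ (fs ps : List Char),
    (List.zipWith pvMask fs ps = ps.take fs.length) ↔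
      ((fs.zip ps).any (fun fp => fp.2 ≠ 'B' && fp.2 ≠ fp.1) = false) := by
  intro fs
  induction fs with
  | nil => intro ps; simp
  | cons f fs ih =>
    intro ps
    cases ps with
    | nil => simp
    | cons p ps =>
      simp only [List.zipWith_cons_cons, List.length_cons, List.take_succ_cons,
        List.zip_cons_cons, List.any_cons, Bool.or_eq_false_iff, List.cons.injEq, ih,
        pvMaskHead]
      simp
      tauto

-- ===== VERDICT (by name: the statement is the Claim_ definition above) =====
theorem can_place_left_spec : Claim_equal_can_place_left := by
  intro fragment pattern _
  unfold Spec_can_place_left can_place_left can_place_left_alt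
  simp only [PySem.List.slice_to_natCast]
  set fs := fragment.toList with hfs
  set ps := pattern.toList with hps
  set n := min fs.length ps.length with hn
  have hppn : (ps.take n).length = n := by simp [hn]
  have hfpn : (fs.take n).length = n := by simp [hn]
  have hloop : pvMaskLoop (ps.take n) ((ps.take n).length + 1) (fs.take n)
      (PySem.Chars.find (ps.take n) ['B']) = List.zipWith pvMask (fs.take n) (ps.take n) := by
    rw [← PySem.Chars.findFrom_zero (ps.take n) ['B']]
    have h0 : ((0 : Int)) = ((0 : Nat) : Int) := rfl
    rw [h0, pvMaskLoop_spec (ps.take n) ((ps.take n).length + 1) 0 (fs.take n)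
      (Nat.zero_le _) (by omega) (by rw [hfpn, hppn])]
    unfold pvMaskFrom
    simp
  rw [hloop]
  have hzw : List.zipWith pvMask (fs.take n) (ps.take n) = List.zipWith pvMask fs ps := by
    rw [← List.take_zipWith]
    exact List.take_of_length_le (by simp [hn])
  have htake : ps.take n = ps.take fs.length := by
    rcases Nat.le_total fs.length ps.length with h | h
    · rw [hn, Nat.min_eq_left h]
    · rw [hn, Nat.min_eq_right h, List.take_length, List.take_of_length_le h]
  rw [pvALoop_eq]
  by_cases hany : (fs.zip ps).any (fun fp => fp.2 ≠ 'B' && fp.2 ≠ fp.1) = true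
  · rw [if_pos hany]
    have hne : List.zipWith pvMask fs ps ≠ ps.take fs.length := by
      intro h
      rw [(pvMaskEqIff fs ps).mp h] at hany
      exact Bool.noConfusion hany
    rw [hzw, htake, if_pos (by exact hne)]
  · rw [Bool.not_eq_true] at hany
    rw [if_neg (by simp only [hany, Bool.false_eq_true, not_false_eq_true])]
    have heq : List.zipWith pvMask fs ps = ps.take fs.length := (pvMaskEqIff fs ps).mpr hany
    rw [hzw, htake, if_neg (by simp [heq]), heq]
    have hcnt : (ps.take fs.length).count 'B' = ((fs.zip ps).map Prod.snd).count 'B' := by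
      rw [pvMapSndZipTake fs ps]
    have hlenzip : ((fs.zip ps).length : Int) = (n : Int) := by simp [hn]
    rw [hcnt] at *
    rw [← hcnt]
    omega
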